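-- pv_equiv track=rewrite | github.com/DOI-USGS/dataretrieval-python | dataretrieval/waterdata/filters.py | _chunk_cql_or
-- ===== SOURCE A (Python) =====
-- from collections.abc import Callable, Iterator
--
-- _CQL_FILTER_CHUNK_LEN = 5000
--
-- def _iter_or_boundaries(expr: str) -> Iterator[tuple[int, int]]:
--     """Yield ``(start, end)`` spans of each top-level ``OR`` separator.
--
--     Tracks single/double-quoted string literals and parenthesized
--     sub-expressions so that ``OR`` tokens inside them are skipped.
--     Matching is case-insensitive and the yielded span covers the
--     surrounding whitespace on both sides.
--     """
--     depth = 0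
--     in_quote = None
--     i = 0
--     n = len(expr)
--     while i < n:
--         ch = expr[i]
--         if in_quote is not None:
--             if ch == in_quote:
--                 in_quote = None
--             i += 1
--             continue
--         if ch in ("'", '"'):
--             in_quote = ch
--             i += 1
--             continue
--         if ch == "(":
--             depth += 1
--             i += 1
--             continue
--         if ch == ")":
--             depth -= 1
--             i += 1
--             continue
--         if depth == 0 and ch.isspace():
--             j = i + 1
--             while j < n and expr[j].isspace():
--                 j += 1
--             if j + 2 <= n and expr[j : j + 2].lower() == "or":
--                 k = j + 2
--                 if k < n and expr[k].isspace():
--                     m = k + 1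
--                     while m < n and expr[m].isspace():
--                         m += 1
--                     yield i, m
--                     i = m
--                     continue
--         i += 1
--
-- def _split_top_level_or(expr: str) -> list[str]:
--     """Split a CQL expression at each top-level ``OR`` separator.
--
--     Respects parentheses and single/double-quoted string literals so that
--     ``OR`` tokens inside ``(A OR B)`` or ``'word OR word'`` are left alone.
--     Matching is case-insensitive. Whitespace around each emitted part is
--     stripped; empty parts are dropped.
--     """
--     parts = []
--     last = 0
--     for start, end in _iter_or_boundaries(expr):
--         parts.append(expr[last:start].strip())
--         last = end
--     parts.append(expr[last:].strip())
--     return [p for p in parts if p]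
--
-- def _chunk_cql_or(expr: str, max_len: int = _CQL_FILTER_CHUNK_LEN) -> list[str]:
--     """Split a CQL expression into OR-chunks that each fit under ``max_len``.
--
--     The splitter only understands top-level ``OR`` chains, since that is
--     the only shape that can be recombined losslessly as a disjunction of
--     independent sub-queries. Returns ``[expr]`` unchanged when the whole
--     expression already fits, when it contains no top-level ``OR``, or when
--     any single clause is larger than ``max_len`` on its own (we would
--     rather send a too-long request and surface the server's 414 than
--     silently drop data).
--     """
--     if len(expr) <= max_len:
--         return [expr]
--     parts = _split_top_level_or(expr)
--     if len(parts) < 2 or any(len(p) > max_len for p in parts):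
--         return [expr]
--
--     chunks = []
--     current = []
--     current_len = 0
--     for part in parts:
--         join_cost = len(" OR ") if current else 0
--         if current and current_len + join_cost + len(part) > max_len:
--             chunks.append(" OR ".join(current))
--             current = [part]
--             current_len = len(part)
--         else:
--             current.append(part)
--             current_len += join_cost + len(part)
--     if current:
--         chunks.append(" OR ".join(current))
--     return chunks
-- ===== SOURCE B (Python) =====
-- _CQL_FILTER_CHUNK_LEN = 5000
--
-- def _top_level_mask(expr):
--     """Pass 1: mask[i] says whether position i sits at paren depth 0 outside quotes."""
--     mask = []
--     depth = 0
--     quote = None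
--     for ch in expr:
--         mask.append(quote is None and depth == 0)
--         if quote is not None:
--             if ch == quote:
--                 quote = None
--         elif ch == "'" or ch == '"':
--             quote = ch
--         elif ch == "(":
--             depth += 1
--         elif ch == ")":
--             depth -= 1
--     return mask
--
-- def _split_top_level_or(expr):
--     """Pass 2: search the lowercased text for 'or' occurrences and keep those that
--     are real top-level separators: whitespace on both sides and outside quotes/parens."""
--     n = len(expr)
--     low = expr.lower()
--     mask = _top_level_mask(expr)
--     parts = []
--     last = 0
--     j = low.find("or", 1)
--     while j != -1:
--         if (expr[j - 1].isspace() and mask[j - 1]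
--                 and j + 2 < n and expr[j + 2].isspace()):
--             p = expr[last:j].strip()
--             if p:
--                 parts.append(p)
--             m = j + 3
--             while m < n and expr[m].isspace():
--                 m += 1
--             last = m
--             j = low.find("or", m + 1)
--         else:
--             j = low.find("or", j + 1)
--     p = expr[last:].strip()
--     if p:
--         parts.append(p)
--     return parts
--
-- def _chunk_cql_or(expr, max_len=_CQL_FILTER_CHUNK_LEN):
--     if len(expr) <= max_len:
--         return [expr]
--     parts = _split_top_level_or(expr)
--     if len(parts) < 2 or any(len(p) > max_len for p in parts):
--         return [expr]
--     chunks = []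
--     first, *rest = parts
--     cur = first
--     for part in rest:
--         if len(cur) + 4 + len(part) > max_len:
--             chunks.append(cur)
--             cur = part
--         else:
--             cur = cur + " OR " + part
--     chunks.append(cur)
--     return chunks
-- ===== Notes on version B (the rewrite author's own statement) =====
-- stated objective: alternative
-- what changed: Replaces A's character-by-character scanner that detects OR separators inline while stepping the quote/paren state machine by a two-pass search: pass 1 precomputes a boolean top-level mask for every position, pass 2 jumps between 'or' occurrences found by substring search in the lowercased text and validates each hit against the mask and surrounding whitespace; packing grows the joined chunk string directly instead of keeping a part list plus a running length.
import Mathlib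
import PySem

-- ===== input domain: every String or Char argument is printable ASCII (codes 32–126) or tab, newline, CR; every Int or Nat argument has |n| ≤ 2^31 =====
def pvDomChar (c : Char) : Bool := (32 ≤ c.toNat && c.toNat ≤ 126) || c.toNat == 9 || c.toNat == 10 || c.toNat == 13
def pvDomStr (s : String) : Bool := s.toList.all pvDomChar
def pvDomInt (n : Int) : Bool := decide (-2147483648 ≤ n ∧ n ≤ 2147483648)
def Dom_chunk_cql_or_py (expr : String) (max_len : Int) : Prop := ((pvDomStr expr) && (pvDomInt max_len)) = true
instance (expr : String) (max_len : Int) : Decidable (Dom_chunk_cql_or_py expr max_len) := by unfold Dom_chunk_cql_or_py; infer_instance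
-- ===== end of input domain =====

-- B replaces A's single character-scanner that detects OR separators inline by a two-pass
-- search (precomputed top-level mask + substring search for 'or' in the lowercased text)
-- and packs chunks by growing the joined string (objective: alternative; same asymptotic cost).

-- Shared helper: the `while j < n and expr[j].isspace(): j += 1` loop both Pythons contain.
def skipWs (cs : List Char) (j : Nat) : Nat :=
  if h : j < cs.length then
    if PySem.Chars.isspace cs[j] then skipWs cs (j + 1) else j
  else j
termination_by cs.length - j

-- cited by the ports' `decreasing_by`
theorem le_skipWs (cs : List Char) (j : Nat) : j ≤ skipWs cs j := by
  unfold skipWs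
  split
  · split
    · exact le_trans (Nat.le_succ j) (le_skipWs cs (j + 1))
    · exact le_refl j
  · exact le_refl j
termination_by cs.length - j

-- ===== PORT A =====
-- _iter_or_boundaries: the generator, as a recursion returning the list of yielded spans
def iterOr (cs : List Char) (i : Nat) (depth : Int) (q : Option Char) : List (Nat × Nat) :=
  if h : i < cs.length then
    match q with
    | some qc =>
      if cs[i] == qc then iterOr cs (i + 1) depth none
      else iterOr cs (i + 1) depth (some qc)
    | none =>
      if cs[i] == '\'' || cs[i] == '"' then iterOr cs (i + 1) depth (some cs[i])
      else if cs[i] == '(' then iterOr cs (i + 1) (depth + 1) none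
      else if cs[i] == ')' then iterOr cs (i + 1) (depth - 1) none
      else if depth == 0 && PySem.Chars.isspace cs[i] then
        let j := skipWs cs (i + 1)
        if decide (j + 2 ≤ cs.length) && (PySem.Chars.lower ((cs.drop j).take 2) == ['o', 'r']) then
          if hk : j + 2 < cs.length then
            if PySem.Chars.isspace cs[j + 2] then
              let m := skipWs cs (j + 2 + 1)
              (i, m) :: iterOr cs m depth none
            else iterOr cs (i + 1) depth none
          else iterOr cs (i + 1) depth none
        else iterOr cs (i + 1) depth none
      else iterOr cs (i + 1) depth none
  else []
termination_by cs.length - i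
decreasing_by
  all_goals first
  | omega
  | (have h1 := le_skipWs cs (i + 1)
     have h2 := le_skipWs cs (skipWs cs (i + 1) + 2 + 1)
     omega)

-- _split_top_level_or: fold over the spans with `last`, then strip/slice and drop empties
def splitTopLevelOr (cs : List Char) : List (List Char) :=
  let bds := iterOr cs 0 0 none
  let st := bds.foldl
    (fun (st : List (List Char) × Nat) se =>
      (st.1 ++ [PySem.Chars.strip ((cs.drop st.2).take (se.1 - st.2))], se.2)) ([], 0)
  (st.1 ++ [PySem.Chars.strip (cs.drop st.2)]).filter (fun p => !p.isEmpty)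

def chunk_cql_or_py (expr : String) (max_len : Int) : List String :=
  let cs := expr.toList
  if decide ((cs.length : Int) ≤ max_len) then [expr]
  else
    let parts := splitTopLevelOr cs
    if decide (parts.length < 2) || parts.any (fun p => decide (max_len < (p.length : Int))) then [expr]
    else
      let st := parts.foldl
        (fun (st : List (List Char) × List (List Char) × Nat) part =>
          let joinCost : Nat := if st.2.1.isEmpty then 0 else 4
          if !st.2.1.isEmpty && decide (max_len < ((st.2.2 + joinCost + part.length : Nat) : Int)) then
            (st.1 ++ [PySem.Chars.join [' ', 'O', 'R', ' '] st.2.1], [part], part.length)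
          else (st.1, st.2.1 ++ [part], st.2.2 + joinCost + part.length))
        ([], [], 0)
      let chunks := if st.2.1.isEmpty then st.1 else st.1 ++ [PySem.Chars.join [' ', 'O', 'R', ' '] st.2.1]
      chunks.map String.ofList

-- ===== PORT B =====
-- _top_level_mask: pass 1, the per-position top-level mask
def maskGo (cs : List Char) (depth : Int) (q : Option Char) : List Bool :=
  match cs with
  | [] => []
  | ch :: rest =>
    (q.isNone && depth == 0) ::
      (match q with
       | some qc => maskGo rest depth (if ch == qc then none else some qc)
       | none =>
         if ch == '\'' || ch == '"' then maskGo rest depth (some ch)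
         else if ch == '(' then maskGo rest (depth + 1) none
         else if ch == ')' then maskGo rest (depth - 1) none
         else maskGo rest depth none)

-- low.find("or", p): index of the first occurrence of "or" at position ≥ p
def findOr (low : List Char) (p : Nat) : Option Nat :=
  if h : p + 1 < low.length then
    if low[p] == 'o' && low[p + 1] == 'r' then some p else findOr low (p + 1)
  else none
termination_by low.length - p

-- cited by bLoop's `decreasing_by`
theorem findOr_bounds (low : List Char) (p j : Nat) (h : findOr low p = some j) :
    p ≤ j ∧ j + 1 < low.length := by
  rw [findOr] at h
  split at h
  · split at h
    · injection h with h; omega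
    · have := findOr_bounds low (p + 1) j h
      omega
  · exact absurd h (by simp)
termination_by low.length - p

-- pass 2: jump between 'or' occurrences, validate each against mask and whitespace
def bLoop (cs low : List Char) (mask : List Bool) (last p : Nat) (acc : List (List Char)) :
    List (List Char) :=
  match hfo : findOr low p with
  | none =>
    let pt := PySem.Chars.strip (cs.drop last)
    if pt.isEmpty then acc else acc ++ [pt]
  | some j =>
    if PySem.Chars.isspace (cs.getD (j - 1) ' ') && mask.getD (j - 1) false
        && decide (j + 2 < cs.length) && PySem.Chars.isspace (cs.getD (j + 2) ' ') then
      let pt := PySem.Chars.strip ((cs.drop last).take (j - last))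
      let m := skipWs cs (j + 3)
      bLoop cs low mask m (m + 1) (if pt.isEmpty then acc else acc ++ [pt])
    else bLoop cs low mask last (j + 1) acc
termination_by low.length - p
decreasing_by
  · have hb := findOr_bounds low p j hfo
    have hm := le_skipWs cs (j + 3)
    omega
  · have hb := findOr_bounds low p j hfo
    omega

-- _split_top_level_or (B): lowercase once, mask once, then the find loop
def bSplit (cs : List Char) : List (List Char) :=
  bLoop cs (PySem.Chars.lower cs) (maskGo cs 0 none) 0 1 []

def chunk_cql_or_py_alt (expr : String) (max_len : Int) : List String :=
  let cs := expr.toList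
  if decide ((cs.length : Int) ≤ max_len) then [expr]
  else
    let parts := bSplit cs
    if decide (parts.length < 2) || parts.any (fun p => decide (max_len < (p.length : Int))) then [expr]
    else
      match parts with
      | [] => [expr]  -- unreachable: parts.length < 2 was caught above
      | first :: rest =>
        let st := rest.foldl
          (fun (st : List (List Char) × List Char) part =>
            if decide (max_len < ((st.2.length + 4 + part.length : Nat) : Int)) then
              (st.1 ++ [st.2], part)
            else (st.1, st.2 ++ ' ' :: 'O' :: 'R' :: ' ' :: part))
          ([], first)
        (st.1 ++ [st.2]).map String.ofList

-- ===== PRECONDITION & SPEC =====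
def Spec_chunk_cql_or_py (expr : String) (max_len : Int) (out : List String) : Prop := out = chunk_cql_or_py_alt expr max_len
instance (expr : String) (max_len : Int) (out : List String) : Decidable (Spec_chunk_cql_or_py expr max_len out) := by unfold Spec_chunk_cql_or_py; infer_instance

-- ===== CLAIM (what is proved, stated in full; the proofs are below) =====
def Claim_equal_chunk_cql_or_py : Prop := ∀ (expr : String) (max_len : Int), Dom_chunk_cql_or_py expr max_len → Spec_chunk_cql_or_py expr max_len (chunk_cql_or_py expr max_len)

-- ===== LEMMAS AND PROOFS =====

-- ---------- proof-side state machine ----------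

def plainCh (c : Char) : Prop := c ≠ '\'' ∧ c ≠ '"' ∧ c ≠ '(' ∧ c ≠ ')'

def stepQ (st : Int × Option Char) (ch : Char) : Int × Option Char :=
  match st with
  | (d, some qc) => (d, if ch == qc then none else some qc)
  | (d, none) =>
    if ch == '\'' || ch == '"' then (d, some ch)
    else if ch == '(' then (d + 1, none)
    else if ch == ')' then (d - 1, none)
    else (d, none)

def stateAt (cs : List Char) (t : Nat) : Int × Option Char := (cs.take t).foldl stepQ (0, none)

def orP (cs : List Char) (j : Nat) : Prop :=
  j + 1 < cs.length ∧ PySem.Chars.lowerChar (cs.getD j ' ') = 'o'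
    ∧ PySem.Chars.lowerChar (cs.getD (j + 1) ' ') = 'r'

def condP (cs : List Char) (j : Nat) : Prop :=
  PySem.Chars.isspace (cs.getD (j - 1) ' ') = true ∧ stateAt cs (j - 1) = (0, none)
    ∧ j + 2 < cs.length ∧ PySem.Chars.isspace (cs.getD (j + 2) ' ') = true

def sepAt (cs : List Char) (t : Nat) : Prop :=
  (skipWs cs (t + 1) + 2 ≤ cs.length
      ∧ PySem.Chars.lower ((cs.drop (skipWs cs (t + 1))).take 2) = ['o', 'r'])
    ∧ skipWs cs (t + 1) + 2 < cs.length
    ∧ PySem.Chars.isspace (cs.getD (skipWs cs (t + 1) + 2) ' ') = true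

def yieldAt (cs : List Char) (x : Nat) : Prop :=
  x < cs.length ∧ stateAt cs x = (0, none)
    ∧ PySem.Chars.isspace (cs.getD x ' ') = true ∧ sepAt cs x

-- ---------- small character facts ----------

theorem length_lower (cs : List Char) : (PySem.Chars.lower cs).length = cs.length := by
  simp [PySem.Chars.lower]

theorem lower_getD (cs : List Char) (j : Nat) (h : j < cs.length) :
    (PySem.Chars.lower cs).getD j ' ' = PySem.Chars.lowerChar (cs.getD j ' ') := by
  rw [List.getD_eq_getElem _ ' ' (by rwa [length_lower]), List.getD_eq_getElem _ ' ' h]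
  simp [PySem.Chars.lower]

theorem isspace_plain (c : Char) (h : PySem.Chars.isspace c = true) : plainCh c := by
  refine ⟨?_, ?_, ?_, ?_⟩ <;> rintro rfl <;> exact absurd h (by decide)

theorem lowerChar_of_isspace (c : Char) (h : PySem.Chars.isspace c = true) :
    PySem.Chars.lowerChar c = c := by
  unfold PySem.Chars.lowerChar
  rw [if_neg]
  intro hu
  unfold PySem.Chars.isupper at hu
  unfold PySem.Chars.isspace at h
  simp only [Bool.or_eq_true, Bool.and_eq_true, decide_eq_true_eq, Char.le_def,
    UInt32.le_iff_toNat_le] at hu h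
  have h65 : (65 : Nat) ≤ c.val.toNat := hu.1
  have h90 : c.val.toNat ≤ (90 : Nat) := hu.2
  have hn : c.toNat = c.val.toNat := rfl
  rw [hn] at h
  omega

theorem not_ws_of_lower_o (c : Char) (h : PySem.Chars.lowerChar c = 'o') :
    PySem.Chars.isspace c = false := by
  by_contra hws
  rw [Bool.not_eq_false] at hws
  rw [lowerChar_of_isspace c hws] at h
  subst h
  exact absurd hws (by decide)

theorem plain_of_lower_eq (c x : Char) (hx : x = 'o' ∨ x = 'r')
    (h : PySem.Chars.lowerChar c = x) : plainCh c := by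
  refine ⟨?_, ?_, ?_, ?_⟩ <;> rintro rfl <;> rcases hx with rfl | rfl <;>
    exact absurd h (by decide)

theorem drop_take_two (cs : List Char) (j : Nat) (h : j + 1 < cs.length) :
    (cs.drop j).take 2 = [cs.getD j ' ', cs.getD (j + 1) ' '] := by
  rw [List.drop_eq_getElem_cons (l := cs) (by omega), List.drop_eq_getElem_cons (l := cs) h]
  rw [List.getD_eq_getElem _ ' ' (by omega : j < cs.length), List.getD_eq_getElem _ ' ' h]
  rfl

-- ---------- stateAt facts ----------

theorem stateAt_succ (cs : List Char) (t : Nat) (ht : t < cs.length) :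
    stateAt cs (t + 1) = stepQ (stateAt cs t) (cs.getD t ' ') := by
  unfold stateAt
  have h : List.take (t + 1) cs = List.take t cs ++ [cs[t]] := by
    rw [List.take_succ, List.getElem?_eq_getElem ht]
    rfl
  rw [h, List.foldl_append, List.getD_eq_getElem _ ' ' ht]
  rfl

theorem stepQ_plain (d : Int) (ch : Char) (h : plainCh ch) : stepQ (d, none) ch = (d, none) := by
  obtain ⟨h1, h2, h3, h4⟩ := h
  simp [stepQ, h1, h2, h3, h4]

theorem quoteInv (cs : List Char) (t : Nat) :
    (stateAt cs t).2 = none ∨ (stateAt cs t).2 = some '\'' ∨ (stateAt cs t).2 = some '"' := by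
  induction t with
  | zero => left; rfl
  | succ t ih =>
    by_cases ht : t < cs.length
    · rcases hS : stateAt cs t with ⟨d0, q0⟩
      rw [stateAt_succ cs t ht, hS]
      rw [hS] at ih
      simp only at ih
      rcases ih with h | h | h <;> subst h
      · simp only [stepQ]
        split_ifs with ha hb hc
        · rcases (by simpa using ha : cs.getD t ' ' = '\'' ∨ cs.getD t ' ' = '"') with h | h
          · rw [h]; right; left; rfl
          · rw [h]; right; right; rfl
        · left; rfl
        · left; rfl
        · left; rfl
      · simp only [stepQ]
        split_ifs
        · left; rfl
        · right; left; rfl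
      · simp only [stepQ]
        split_ifs
        · left; rfl
        · right; right; rfl
    · have heq : stateAt cs (t + 1) = stateAt cs t := by
        unfold stateAt
        rw [List.take_of_length_le (by omega), List.take_of_length_le (by omega)]
      rw [heq]
      exact ih

theorem stateAt_const_plain (cs : List Char) (a b : Nat) (d : Int) (hab : a ≤ b)
    (hb : b ≤ cs.length)
    (hpl : ∀ y, a ≤ y → y < b → plainCh (cs.getD y ' '))
    (ha : stateAt cs a = (d, none)) : stateAt cs b = (d, none) := by
  rcases Nat.eq_or_lt_of_le hab with rfl | hlt
  · exact ha
  · have hlen : a < cs.length := by omega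
    have hstep : stateAt cs (a + 1) = (d, none) := by
      rw [stateAt_succ cs a hlen, ha]
      exact stepQ_plain d _ (hpl a le_rfl hlt)
    exact stateAt_const_plain cs (a + 1) b d hlt hb (fun y h1 h2 => hpl y (by omega) h2) hstep
termination_by b - a

theorem stateAt_ws_const (cs : List Char) (a b : Nat) (hab : a ≤ b) (hb : b ≤ cs.length)
    (hws : ∀ y, a ≤ y → y < b → PySem.Chars.isspace (cs.getD y ' ') = true) :
    stateAt cs b = stateAt cs a := by
  rcases Nat.eq_or_lt_of_le hab with rfl | hlt
  · rfl
  · have hlen : a < cs.length := by omega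
    have hwa := hws a le_rfl hlt
    have hpl := isspace_plain _ hwa
    have hstep : stateAt cs (a + 1) = stateAt cs a := by
      rw [stateAt_succ cs a hlen]
      rcases hS : stateAt cs a with ⟨d0, q0⟩
      have hq := quoteInv cs a
      rw [hS] at hq
      simp only at hq
      rcases hq with h | h | h <;> subst h
      · exact stepQ_plain d0 _ hpl
      · simp only [stepQ]
        rw [if_neg]
        simp only [beq_iff_eq]
        exact hpl.1
      · simp only [stepQ]
        rw [if_neg]
        simp only [beq_iff_eq]
        exact hpl.2.1
    rw [← hstep]
    exact stateAt_ws_const cs (a + 1) b hlt hb (fun y h1 h2 => hws y (by omega) h2)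
termination_by b - a

-- ---------- skipWs facts ----------

theorem skipWs_ws (cs : List Char) (a y : Nat) (h1 : a ≤ y) (h2 : y < skipWs cs a) :
    y < cs.length ∧ PySem.Chars.isspace (cs.getD y ' ') = true := by
  rw [skipWs] at h2
  by_cases hlen : a < cs.length
  · rw [dif_pos hlen] at h2
    by_cases hws : PySem.Chars.isspace cs[a] = true
    · rw [if_pos hws] at h2
      rcases Nat.eq_or_lt_of_le h1 with rfl | hlt
      · exact ⟨hlen, by rwa [List.getD_eq_getElem _ ' ' hlen]⟩
      · exact skipWs_ws cs (a + 1) y hlt h2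
    · rw [if_neg hws] at h2
      omega
  · rw [dif_neg hlen] at h2
    omega
termination_by cs.length - a

theorem skipWs_le_length (cs : List Char) (a : Nat) (h : a ≤ cs.length) :
    skipWs cs a ≤ cs.length := by
  rw [skipWs]
  by_cases hlen : a < cs.length
  · rw [dif_pos hlen]
    by_cases hws : PySem.Chars.isspace cs[a] = true
    · rw [if_pos hws]
      exact skipWs_le_length cs (a + 1) (by omega)
    · rw [if_neg hws]
      omega
  · rw [dif_neg hlen]
    omega
termination_by cs.length - a

theorem skipWs_eq (cs : List Char) (a b : Nat) (hab : a ≤ b) (hb : b ≤ cs.length)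
    (hws : ∀ y, a ≤ y → y < b → PySem.Chars.isspace (cs.getD y ' ') = true)
    (hstop : b = cs.length ∨ PySem.Chars.isspace (cs.getD b ' ') = false) :
    skipWs cs a = b := by
  rcases Nat.eq_or_lt_of_le hab with rfl | hlt
  · rw [skipWs]
    by_cases hlen : a < cs.length
    · rw [dif_pos hlen]
      rcases hstop with h | h
      · omega
      · rw [if_neg]
        rw [List.getD_eq_getElem _ ' ' hlen] at h
        simp [h]
    · rw [dif_neg hlen]
  · have hlen : a < cs.length := by omega
    rw [skipWs, dif_pos hlen]
    rw [if_pos (by rw [← List.getD_eq_getElem _ ' ' hlen]; exact hws a le_rfl hlt)]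
    exact skipWs_eq cs (a + 1) b hlt hb (fun y hy1 hy2 => hws y (by omega) hy2) hstop
termination_by b - a

-- ---------- mask facts ----------

theorem maskGo_step (ch : Char) (rest : List Char) (d : Int) (q : Option Char) :
    maskGo (ch :: rest) d q
      = (q.isNone && d == 0) :: maskGo rest (stepQ (d, q) ch).1 (stepQ (d, q) ch).2 := by
  cases q with
  | some qc => rfl
  | none =>
    simp only [maskGo, stepQ]
    by_cases h1 : (ch == '\'' || ch == '"') = true
    · simp [h1]
    · by_cases h2 : (ch == '(') = true
      · simp [h1, h2]
      · by_cases h3 : (ch == ')') = true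
        · simp [h1, h2, h3]
        · simp [h1, h2, h3]

theorem maskGo_getD (cs : List Char) (d : Int) (q : Option Char) (k : Nat) (hk : k < cs.length) :
    (maskGo cs d q).getD k false
      = (((cs.take k).foldl stepQ (d, q)).2.isNone && ((cs.take k).foldl stepQ (d, q)).1 == 0) := by
  induction cs generalizing d q k with
  | nil => simp at hk
  | cons ch rest ih =>
    rw [maskGo_step]
    cases k with
    | zero => simp
    | succ k =>
      simp only [List.getD_cons_succ, List.take_succ_cons, List.foldl_cons]
      exact ih (stepQ (d, q) ch).1 (stepQ (d, q) ch).2 k (by simpa using hk)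

theorem mask_top (cs : List Char) (k : Nat) (hk : k < cs.length) :
    ((maskGo cs 0 none).getD k false = true) ↔ stateAt cs k = (0, none) := by
  rw [maskGo_getD cs 0 none k hk]
  unfold stateAt
  rcases (cs.take k).foldl stepQ ((0 : Int), (none : Option Char)) with ⟨d0, q0⟩
  simp only [Bool.and_eq_true, Option.isNone_iff_eq_none, beq_iff_eq, Prod.mk.injEq]
  tauto

-- ---------- findOr facts ----------

theorem findOr_some_spec (low : List Char) (p j : Nat) (h : findOr low p = some j) :
    p ≤ j ∧ j + 1 < low.length ∧ low.getD j ' ' = 'o' ∧ low.getD (j + 1) ' ' = 'r'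
      ∧ ∀ k, p ≤ k → k < j →
          ¬ (k + 1 < low.length ∧ low.getD k ' ' = 'o' ∧ low.getD (k + 1) ' ' = 'r') := by
  rw [findOr] at h
  by_cases hlen : p + 1 < low.length
  · rw [dif_pos hlen] at h
    by_cases hor : (low[p] == 'o' && low[p + 1] == 'r') = true
    · rw [if_pos hor] at h
      injection h with h
      subst h
      simp only [Bool.and_eq_true, beq_iff_eq] at hor
      refine ⟨le_rfl, hlen, ?_, ?_, fun k hk1 hk2 => absurd hk2 (by omega)⟩
      · rw [List.getD_eq_getElem _ ' ' (by omega)]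
        exact hor.1
      · rw [List.getD_eq_getElem _ ' ' hlen]
        exact hor.2
    · rw [if_neg hor] at h
      obtain ⟨h1, h2, h3, h4, h5⟩ := findOr_some_spec low (p + 1) j h
      refine ⟨by omega, h2, h3, h4, ?_⟩
      intro k hk1 hk2 hcon
      rcases Nat.eq_or_lt_of_le hk1 with rfl | hklt
      · apply hor
        obtain ⟨hc1, hc2, hc3⟩ := hcon
        rw [List.getD_eq_getElem _ ' ' (by omega)] at hc2
        rw [List.getD_eq_getElem _ ' ' hc1] at hc3
        simp [hc2, hc3]
      · exact h5 k hklt hk2 hcon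
  · rw [dif_neg hlen] at h
    exact absurd h (by simp)
termination_by low.length - p

theorem findOr_none_spec (low : List Char) (p : Nat) (h : findOr low p = none) :
    ∀ k, p ≤ k →
      ¬ (k + 1 < low.length ∧ low.getD k ' ' = 'o' ∧ low.getD (k + 1) ' ' = 'r') := by
  intro k hk hcon
  rw [findOr] at h
  by_cases hlen : p + 1 < low.length
  · rw [dif_pos hlen] at h
    by_cases hor : (low[p] == 'o' && low[p + 1] == 'r') = true
    · rw [if_pos hor] at h
      exact absurd h (by simp)
    · rw [if_neg hor] at h
      rcases Nat.eq_or_lt_of_le hk with rfl | hklt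
      · apply hor
        obtain ⟨hc1, hc2, hc3⟩ := hcon
        rw [List.getD_eq_getElem _ ' ' (by omega)] at hc2
        rw [List.getD_eq_getElem _ ' ' hc1] at hc3
        simp [hc2, hc3]
      · exact findOr_none_spec low (p + 1) h k hklt hcon
  · rw [dif_neg hlen] at h
    obtain ⟨hc1, _, _⟩ := hcon
    omega
termination_by low.length - p

-- ---------- iterOr stepping facts ----------

theorem iterOr_nil (cs : List Char) (t : Nat) (d : Int) (q : Option Char)
    (h : cs.length ≤ t) : iterOr cs t d q = [] := by
  rw [iterOr, dif_neg (by omega)]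

theorem iterOr_step (cs : List Char) (t : Nat) (d : Int) (q : Option Char) (ht : t < cs.length)
    (hny : ¬ (q = none ∧ d = 0 ∧ PySem.Chars.isspace (cs.getD t ' ') = true ∧ sepAt cs t)) :
    iterOr cs t d q
      = iterOr cs (t + 1) (stepQ (d, q) (cs.getD t ' ')).1 (stepQ (d, q) (cs.getD t ' ')).2 := by
  have hg : cs.getD t ' ' = cs[t] := List.getD_eq_getElem cs ' ' ht
  rw [iterOr, dif_pos ht, hg]
  cases q with
  | some qc =>
    simp only [stepQ]
    by_cases hq : (cs[t] == qc) = true <;> simp [hq]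
  | none =>
    simp only [stepQ]
    by_cases h1 : (cs[t] == '\'' || cs[t] == '"') = true
    · simp [h1]
    · by_cases h2 : (cs[t] == '(') = true
      · simp [h1, h2]
      · by_cases h3 : (cs[t] == ')') = true
        · simp [h1, h2, h3]
        · by_cases h4 : (d == 0 && PySem.Chars.isspace cs[t]) = true
          · simp only [Bool.and_eq_true, beq_iff_eq] at h4
            obtain ⟨hd, hws⟩ := h4
            subst hd
            by_cases h5 : (decide (skipWs cs (t + 1) + 2 ≤ cs.length)
                && (PySem.Chars.lower ((cs.drop (skipWs cs (t + 1))).take 2) == ['o', 'r'])) = true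
            · by_cases h6 : skipWs cs (t + 1) + 2 < cs.length
              · by_cases h7 : PySem.Chars.isspace cs[skipWs cs (t + 1) + 2] = true
                · exfalso
                  apply hny
                  refine ⟨rfl, rfl, by rwa [hg], ⟨?_, h6, ?_⟩⟩
                  · simpa using h5
                  · rwa [List.getD_eq_getElem _ ' ' h6]
                · simp [h1, h2, h3, hws, h5, h6, h7]
              · simp [h1, h2, h3, hws, h5, h6]
            · simp [h1, h2, h3, hws, h5]
          · simp [h1, h2, h3, h4]

theorem iterOr_yield (cs : List Char) (t : Nat) (ht : t < cs.length)
    (hws : PySem.Chars.isspace (cs.getD t ' ') = true) (hsep : sepAt cs t) :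
    iterOr cs t 0 none
      = (t, skipWs cs (skipWs cs (t + 1) + 2 + 1))
          :: iterOr cs (skipWs cs (skipWs cs (t + 1) + 2 + 1)) 0 none := by
  obtain ⟨⟨hle, hor⟩, hlt, hsp2⟩ := hsep
  have hg : cs.getD t ' ' = cs[t] := List.getD_eq_getElem cs ' ' ht
  rw [hg] at hws
  have hpl := isspace_plain _ hws
  have h1 : (cs[t] == '\'' || cs[t] == '"') = false := by
    simp [hpl.1, hpl.2.1]
  have h2 : (cs[t] == '(') = false := by simp [hpl.2.2.1]
  have h3 : (cs[t] == ')') = false := by simp [hpl.2.2.2]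
  have h5 : (decide (skipWs cs (t + 1) + 2 ≤ cs.length)
      && (PySem.Chars.lower ((cs.drop (skipWs cs (t + 1))).take 2) == ['o', 'r'])) = true := by
    simp [hle, hor]
  have hsp2' : PySem.Chars.isspace cs[skipWs cs (t + 1) + 2] = true := by
    rwa [List.getD_eq_getElem _ ' ' hlt] at hsp2
  rw [iterOr, dif_pos ht]
  simp [h1, h2, h3, hws, h5, hlt, hsp2']

theorem walk (cs : List Char) (t u : Nat) (htu : t ≤ u) (hu : u ≤ cs.length)
    (hny : ∀ x, t ≤ x → x < u → ¬ yieldAt cs x) :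
    iterOr cs t (stateAt cs t).1 (stateAt cs t).2
      = iterOr cs u (stateAt cs u).1 (stateAt cs u).2 := by
  rcases Nat.eq_or_lt_of_le htu with rfl | hlt
  · rfl
  · have ht : t < cs.length := by omega
    have hstep : iterOr cs t (stateAt cs t).1 (stateAt cs t).2
        = iterOr cs (t + 1) (stateAt cs (t + 1)).1 (stateAt cs (t + 1)).2 := by
      rw [stateAt_succ cs t ht]
      have := iterOr_step cs t (stateAt cs t).1 (stateAt cs t).2 ht ?hn
      · simpa using this
      · intro ⟨hq, hd, hw, hs⟩
        exact hny t le_rfl hlt ⟨ht, by rw [Prod.ext_iff]; exact ⟨hd, hq⟩, hw, hs⟩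
    rw [hstep]
    exact walk cs (t + 1) u hlt hu (fun x h1 h2 => hny x (by omega) h2)
termination_by u - t

-- every A-yield at x determines a valid B candidate at j = skipWs (x+1)
theorem yield_cond (cs : List Char) (x : Nat) (hy : yieldAt cs x) :
    x + 1 ≤ skipWs cs (x + 1) ∧ skipWs cs (x + 1) + 2 < cs.length ∧
    PySem.Chars.isspace (cs.getD (skipWs cs (x + 1) - 1) ' ') = true ∧
    stateAt cs (skipWs cs (x + 1) - 1) = (0, none) ∧
    PySem.Chars.isspace (cs.getD (skipWs cs (x + 1) + 2) ' ') = true ∧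
    PySem.Chars.lowerChar (cs.getD (skipWs cs (x + 1)) ' ') = 'o' ∧
    PySem.Chars.lowerChar (cs.getD (skipWs cs (x + 1) + 1) ' ') = 'r' := by
  obtain ⟨hxlen, hst, hxws, ⟨⟨hle, hor⟩, hlt, hsp2⟩⟩ := hy
  set j := skipWs cs (x + 1) with hj
  have hxj : x + 1 ≤ j := le_skipWs cs (x + 1)
  rw [drop_take_two cs j (by omega)] at hor
  have hor' : PySem.Chars.lowerChar (cs.getD j ' ') = 'o'
      ∧ PySem.Chars.lowerChar (cs.getD (j + 1) ' ') = 'r' := by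
    simpa [PySem.Chars.lower] using hor
  have hwsrun : ∀ y, x ≤ y → y < j → PySem.Chars.isspace (cs.getD y ' ') = true := by
    intro y hy1 hy2
    rcases Nat.eq_or_lt_of_le hy1 with rfl | hy1'
    · exact hxws
    · exact (skipWs_ws cs (x + 1) y hy1' hy2).2
  have hwsj1 : PySem.Chars.isspace (cs.getD (j - 1) ' ') = true :=
    hwsrun (j - 1) (by omega) (by omega)
  have hstj1 : stateAt cs (j - 1) = (0, none) := by
    rw [stateAt_ws_const cs x (j - 1) (by omega) (by omega)
      (fun y h1 h2 => hwsrun y h1 (by omega))]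
    exact hst
  exact ⟨hxj, hlt, hwsj1, hstj1, hsp2, hor'.1, hor'.2⟩

-- ---------- strip facts ----------

theorem dropWhile_ws_nil (w : List Char) (h : ∀ c ∈ w, PySem.Chars.isspace c = true) :
    w.dropWhile PySem.Chars.isspace = [] :=
  List.dropWhile_eq_nil_iff.mpr (fun x hx => h x hx)

theorem strip_append_ws (xs w : List Char) (h : ∀ c ∈ w, PySem.Chars.isspace c = true) :
    PySem.Chars.strip (xs ++ w) = PySem.Chars.strip xs := by
  unfold PySem.Chars.strip PySem.Chars.lstrip PySem.Chars.rstrip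
  rw [List.dropWhile_append]
  by_cases he : (xs.dropWhile PySem.Chars.isspace).isEmpty
  · rw [if_pos he, dropWhile_ws_nil w h]
    have hx : xs.dropWhile PySem.Chars.isspace = [] := by simpa [List.isEmpty_iff] using he
    rw [hx]
  · have hwrev : (w.reverse.dropWhile PySem.Chars.isspace).isEmpty = true := by
      rw [dropWhile_ws_nil w.reverse (fun c hc => h c (List.mem_reverse.mp hc))]
      rfl
    rw [if_neg he, List.reverse_append, List.dropWhile_append, if_pos hwrev]

theorem strip_take_eq (cs : List Char) (last i j : Nat) (hli : last ≤ i) (hij : i ≤ j)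
    (hjlen : j ≤ cs.length)
    (hws : ∀ y, i ≤ y → y < j → PySem.Chars.isspace (cs.getD y ' ') = true) :
    PySem.Chars.strip ((cs.drop last).take (j - last))
      = PySem.Chars.strip ((cs.drop last).take (i - last)) := by
  have hsplit : (cs.drop last).take (j - last)
      = (cs.drop last).take (i - last) ++ ((cs.drop i).take (j - i)) := by
    have h1 : j - last = (i - last) + (j - i) := by omega
    have h2 : last + (i - last) = i := by omega
    rw [h1, List.take_add, List.drop_drop, h2]
  rw [hsplit, strip_append_ws]
  intro c hc
  obtain ⟨k, hk, rfl⟩ := List.getElem_of_mem hc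
  have hkt : k < (List.take (j - i) (List.drop i cs)).length := hk
  rw [List.length_take, List.length_drop] at hkt
  have hb : i + k < cs.length := by omega
  have hgoal : (List.take (j - i) (List.drop i cs))[k] = cs[i + k] := by
    rw [List.getElem_take, List.getElem_drop]
  rw [hgoal, ← List.getD_eq_getElem _ ' ' hb]
  exact hws (i + k) (by omega) (by omega)

-- ---------- the accepted-candidate step ----------

theorem accept_step (cs : List Char) (last j : Nat)
    (hstate : stateAt cs last = (0, none))
    (hlj : last + 1 ≤ j)
    (hws1 : PySem.Chars.isspace (cs.getD (j - 1) ' ') = true)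
    (htop : stateAt cs (j - 1) = (0, none))
    (hjlen : j + 2 < cs.length)
    (hws2 : PySem.Chars.isspace (cs.getD (j + 2) ' ') = true)
    (hlo : PySem.Chars.lowerChar (cs.getD j ' ') = 'o')
    (hlr : PySem.Chars.lowerChar (cs.getD (j + 1) ' ') = 'r')
    (hmiss : ∀ k, last + 1 ≤ k → k < j → orP cs k → ¬ condP cs k) :
    ∃ i, last ≤ i ∧ i < j ∧
      iterOr cs last 0 none
        = (i, skipWs cs (j + 3)) :: iterOr cs (skipWs cs (j + 3)) 0 none ∧
      PySem.Chars.strip ((cs.drop last).take (i - last))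
        = PySem.Chars.strip ((cs.drop last).take (j - last)) ∧
      stateAt cs (skipWs cs (j + 3)) = (0, none) := by
  -- i = least start of the whitespace run ending at j-1, clipped at last
  have hex : ∃ x, last ≤ x ∧ ∀ y, y < j → x ≤ y → PySem.Chars.isspace (cs.getD y ' ') = true := by
    refine ⟨j - 1, by omega, fun y hy1 hy2 => ?_⟩
    have : y = j - 1 := by omega
    subst this
    exact hws1
  set i := Nat.find hex with hidef
  obtain ⟨hli, hirun⟩ := Nat.find_spec hex
  have hile : i ≤ j - 1 := Nat.find_min' hex ⟨by omega, fun y hy1 hy2 => by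
    have : y = j - 1 := by omega
    subst this
    exact hws1⟩
  have hij : i < j := by omega
  have hwsrun : ∀ y, i ≤ y → y < j → PySem.Chars.isspace (cs.getD y ' ') = true :=
    fun y h1 h2 => hirun y h2 h1
  -- whitespace does not start earlier (or we are clipped at last)
  have hnoext : ∀ x, last ≤ x → x < i →
      ¬ (∀ y, x ≤ y → y < j → PySem.Chars.isspace (cs.getD y ' ') = true) := by
    intro x hx1 hx2 hall
    have := Nat.find_min' hex (m := x) ⟨hx1, fun y hy1 hy2 => hall y hy2 hy1⟩
    omega
  -- the state is top-level throughout the run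
  have hsti : stateAt cs i = (0, none) := by
    rw [← htop]
    exact (stateAt_ws_const cs i (j - 1) (by omega) (by omega)
      (fun y h1 h2 => hwsrun y h1 (by omega))).symm
  -- skipWs from i+1 lands exactly on j
  have hnwsj : PySem.Chars.isspace (cs.getD j ' ') = false := not_ws_of_lower_o _ hlo
  have hskip : skipWs cs (i + 1) = j :=
    skipWs_eq cs (i + 1) j (by omega) (by omega)
      (fun y h1 h2 => hwsrun y (by omega) h2) (Or.inr hnwsj)
  -- no yield strictly before i
  have hnoyield : ∀ x, last ≤ x → x < i → ¬ yieldAt cs x := by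
    intro x hx1 hx2 hy
    obtain ⟨hxj, hlt2, hwsj1, hstj1, hsp2, hco, hcr⟩ := yield_cond cs x hy
    set j2 := skipWs cs (x + 1) with hj2
    by_cases hcase : j2 < j
    · exact hmiss j2 (by omega) hcase ⟨by omega, hco, hcr⟩ ⟨hwsj1, hstj1, hlt2, hsp2⟩
    · -- then everything from x to j is whitespace, contradicting minimality of i
      apply hnoext x hx1 hx2
      intro y hy1 hy2
      rcases Nat.eq_or_lt_of_le hy1 with rfl | hy1'
      · exact hy.2.2.1
      · exact (skipWs_ws cs (x + 1) y hy1' (by omega)).2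
  -- walk from last to i, then yield
  have hwalk := walk cs last i hli (by omega) hnoyield
  rw [hstate] at hwalk
  rw [hsti] at hwalk
  simp only at hwalk
  have hsep : sepAt cs i := by
    refine ⟨⟨by rw [hskip]; omega, ?_⟩, by rw [hskip]; omega, by rw [hskip]; exact hws2⟩
    rw [hskip, drop_take_two cs j (by omega)]
    simp only [PySem.Chars.lower, List.map_cons, List.map_nil, hlo, hlr]
  have hyld := iterOr_yield cs i (by omega) (hwsrun i le_rfl hij) hsep
  rw [hskip] at hyld
  have hm3 : j + 2 + 1 = j + 3 := rfl
  rw [hm3] at hyld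
  refine ⟨i, hli, hij, ?_, ?_, ?_⟩
  · rw [hwalk, hyld]
  · exact (strip_take_eq cs last i j hli (by omega) (by omega) hwsrun).symm
  · -- state is still top-level at m: the chars in [j-1, m) are ws / o / r / ws
    have hm := skipWs_le_length cs (j + 3) (by omega)
    have hple : ∀ y, j - 1 ≤ y → y < skipWs cs (j + 3) → plainCh (cs.getD y ' ') := by
      intro y h1 h2
      rcases Nat.lt_or_ge y j with hy | hy
      · exact isspace_plain _ (hwsrun y (by omega) hy)
      · rcases Nat.eq_or_lt_of_le hy with rfl | hy'
        · exact plain_of_lower_eq _ _ (Or.inl rfl) hlo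
        · rcases Nat.eq_or_lt_of_le hy' with hyy | hy''
          · rw [← hyy]
            exact plain_of_lower_eq _ _ (Or.inr rfl) hlr
          · rcases Nat.eq_or_lt_of_le hy'' with hyy | hy3
            · have : y = j + 2 := by omega
              subst this
              exact isspace_plain _ hws2
            · exact isspace_plain _ ((skipWs_ws cs (j + 3) y (by omega) h2).2)
    exact stateAt_const_plain cs (j - 1) (skipWs cs (j + 3)) 0 (by
      have := le_skipWs cs (j + 3); omega) hm hple htop

-- parts that A's splitter produces from a span list, before dropping empties
def partsFrom (cs : List Char) (last : Nat) : List (Nat × Nat) → List (List Char)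
  | [] => [PySem.Chars.strip (cs.drop last)]
  | (s, e) :: r => PySem.Chars.strip ((cs.drop last).take (s - last)) :: partsFrom cs e r

-- ---------- the main loop correspondence ----------

theorem bLoop_eq (cs : List Char) (last p : Nat) (acc : List (List Char))
    (hlast : last ≤ cs.length)
    (hstate : stateAt cs last = (0, none))
    (hp : last + 1 ≤ p)
    (hmiss : ∀ k, last + 1 ≤ k → k < p → orP cs k → ¬ condP cs k) :
    bLoop cs (PySem.Chars.lower cs) (maskGo cs 0 none) last p acc
      = acc ++ (partsFrom cs last (iterOr cs last 0 none)).filter (fun q => !q.isEmpty) := by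
  rw [bLoop]
  rcases hfo : findOr (PySem.Chars.lower cs) p with _ | j
  all_goals simp only [hfo]
  · -- no further occurrence: A yields nothing from last on
    have hnone := findOr_none_spec _ p hfo
    have hnoyield : ∀ x, last ≤ x → x < cs.length → ¬ yieldAt cs x := by
      intro x hx1 hx2 hy
      obtain ⟨hxj, hlt2, hwsj1, hstj1, hsp2, hco, hcr⟩ := yield_cond cs x hy
      set j2 := skipWs cs (x + 1) with hj2
      by_cases hcase : j2 < p
      · exact hmiss j2 (by omega) hcase ⟨by omega, hco, hcr⟩ ⟨hwsj1, hstj1, hlt2, hsp2⟩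
      · refine hnone j2 (by omega) ⟨by rw [length_lower]; omega, ?_, ?_⟩
        · rw [lower_getD cs j2 (by omega)]
          exact hco
        · rw [lower_getD cs (j2 + 1) (by omega)]
          exact hcr
    have hempty : iterOr cs last 0 none = [] := by
      have hwalk := walk cs last cs.length hlast le_rfl
        (fun x h1 h2 => hnoyield x h1 h2)
      rw [hstate] at hwalk
      simp only at hwalk
      rw [hwalk]
      exact iterOr_nil cs cs.length _ _ le_rfl
    rw [hempty]
    simp only [partsFrom, List.filter]
    by_cases he : (PySem.Chars.strip (cs.drop last)).isEmpty
    · simp [he]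
    · simp [he]
  · -- found an occurrence at j
    obtain ⟨hpj, hjlen', hco', hcr', hmin⟩ := findOr_some_spec _ p j hfo
    rw [length_lower] at hjlen'
    have horj : orP cs j := by
      refine ⟨hjlen', ?_, ?_⟩
      · rw [← lower_getD cs j (by omega)]
        exact hco'
      · rw [← lower_getD cs (j + 1) hjlen']
        exact hcr'
    have hminP : ∀ k, p ≤ k → k < j → ¬ orP cs k := by
      intro k h1 h2 ⟨hk1, hk2, hk3⟩
      refine hmin k h1 h2 ⟨by rw [length_lower]; exact hk1, ?_, ?_⟩
      · rw [lower_getD cs k (by omega)]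
        exact hk2
      · rw [lower_getD cs (k + 1) hk1]
        exact hk3
    have hmissj : ∀ k, last + 1 ≤ k → k < j → orP cs k → ¬ condP cs k := by
      intro k h1 h2
      rcases Nat.lt_or_ge k p with hk | hk
      · exact hmiss k h1 hk
      · exact fun ho _ => hminP k hk h2 ho
    by_cases hcond : (PySem.Chars.isspace (cs.getD (j - 1) ' ')
        && (maskGo cs 0 none).getD (j - 1) false
        && decide (j + 2 < cs.length) && PySem.Chars.isspace (cs.getD (j + 2) ' ')) = true
    · rw [if_pos hcond]
      simp only [Bool.and_eq_true, decide_eq_true_eq] at hcond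
      obtain ⟨⟨⟨hws1, hmask⟩, hlen2⟩, hws2⟩ := hcond
      have htop : stateAt cs (j - 1) = (0, none) :=
        (mask_top cs (j - 1) (by omega)).mp hmask
      obtain ⟨i, hli, hij, hiter, hstrip, hstm⟩ :=
        accept_step cs last j hstate (by omega) hws1 htop hlen2 hws2 horj.2.1 horj.2.2 hmissj
      have hrec := bLoop_eq cs (skipWs cs (j + 3)) (skipWs cs (j + 3) + 1)
        (if (PySem.Chars.strip ((cs.drop last).take (j - last))).isEmpty
          then acc else acc ++ [PySem.Chars.strip ((cs.drop last).take (j - last))])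
        (skipWs_le_length cs (j + 3) (by omega)) hstm le_rfl
        (fun k h1 h2 => absurd h2 (by omega))
      rw [hrec, hiter]
      simp only [partsFrom, List.filter_cons, hstrip]
      by_cases he : (PySem.Chars.strip ((cs.drop last).take (j - last))).isEmpty
      · simp [he]
      · simp [he, List.append_assoc]
    · rw [if_neg hcond]
      have hmiss' : ∀ k, last + 1 ≤ k → k < j + 1 → orP cs k → ¬ condP cs k := by
        intro k h1 h2 ho hc
        rcases Nat.lt_or_ge k j with hk | hk
        · exact hmissj k h1 hk ho hc
        · have : k = j := by omega
          subst this
          apply hcond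
          obtain ⟨hc1, hc2, hc3, hc4⟩ := hc
          have hm : (maskGo cs 0 none).getD (k - 1) false = true :=
            (mask_top cs (k - 1) (by omega)).mpr hc2
          rw [hc1, hm, hc4]
          simp [hc3]
      exact bLoop_eq cs last (j + 1) acc hlast hstate (by omega) hmiss'
termination_by cs.length - p
decreasing_by
  · have hb := findOr_bounds _ p j hfo
    rw [length_lower] at hb
    have hm := le_skipWs cs (j + 3)
    omega
  · have hb := findOr_bounds _ p j hfo
    rw [length_lower] at hb
    omega

theorem bSplit_eq (cs : List Char) :
    bSplit cs = (partsFrom cs 0 (iterOr cs 0 0 none)).filter (fun q => !q.isEmpty) := by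
  unfold bSplit
  rw [bLoop_eq cs 0 1 [] (by omega) rfl le_rfl (fun k h1 h2 => absurd h2 (by omega))]
  simp

-- ---------- A's splitter produces the same filtered parts ----------

theorem foldl_spans (cs : List Char) :
    ∀ (spans : List (Nat × Nat)) (parts : List (List Char)) (last : Nat),
      (spans.foldl (fun (st : List (List Char) × Nat) se =>
          (st.1 ++ [PySem.Chars.strip ((cs.drop st.2).take (se.1 - st.2))], se.2)) (parts, last)).1
        ++ [PySem.Chars.strip (cs.drop
            (spans.foldl (fun (st : List (List Char) × Nat) se =>
              (st.1 ++ [PySem.Chars.strip ((cs.drop st.2).take (se.1 - st.2))], se.2)) (parts, last)).2)]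
      = parts ++ partsFrom cs last spans := by
  intro spans
  induction spans with
  | nil => intro parts last; simp [partsFrom]
  | cons se r ih =>
    intro parts last
    obtain ⟨s, e⟩ := se
    simp only [List.foldl_cons, partsFrom]
    rw [ih]
    simp [List.append_assoc]

theorem splitTopLevelOr_eq_bSplit (cs : List Char) :
    splitTopLevelOr cs = bSplit cs := by
  rw [bSplit_eq]
  unfold splitTopLevelOr
  conv_rhs => rw [← List.nil_append (partsFrom cs 0 (iterOr cs 0 0 none))]
  rw [← foldl_spans cs (iterOr cs 0 0 none) [] 0]

-- ---------- the greedy packing loops agree ----------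

theorem join_concat (sep : List Char) (l : List (List Char)) (x : List Char) (h : l ≠ []) :
    PySem.Chars.join sep (l ++ [x]) = PySem.Chars.join sep l ++ sep ++ x := by
  induction l with
  | nil => exact absurd rfl h
  | cons a t ih =>
    cases t with
    | nil => simp [PySem.Chars.join_cons_cons, PySem.Chars.join_singleton]
    | cons b r =>
      have ih' := ih (by simp)
      rw [List.cons_append] at ih'
      rw [List.cons_append, List.cons_append]
      rw [PySem.Chars.join_cons_cons]
      rw [ih']
      rw [PySem.Chars.join_cons_cons]
      simp [List.append_assoc]

theorem pack_eq (max_len : Int) :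
    ∀ (rest : List (List Char)) (chunks current : List (List Char)) (clen : Nat),
      current ≠ [] → clen = (PySem.Chars.join [' ', 'O', 'R', ' '] current).length →
      ((rest.foldl (fun (st : List (List Char) × List (List Char) × Nat) part =>
          let joinCost : Nat := if st.2.1.isEmpty then 0 else 4
          if !st.2.1.isEmpty && decide (max_len < ((st.2.2 + joinCost + part.length : Nat) : Int)) then
            (st.1 ++ [PySem.Chars.join [' ', 'O', 'R', ' '] st.2.1], [part], part.length)
          else (st.1, st.2.1 ++ [part], st.2.2 + joinCost + part.length)) (chunks, current, clen)).2.1 ≠ []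
      ∧ (rest.foldl (fun (st : List (List Char) × List (List Char) × Nat) part =>
          let joinCost : Nat := if st.2.1.isEmpty then 0 else 4
          if !st.2.1.isEmpty && decide (max_len < ((st.2.2 + joinCost + part.length : Nat) : Int)) then
            (st.1 ++ [PySem.Chars.join [' ', 'O', 'R', ' '] st.2.1], [part], part.length)
          else (st.1, st.2.1 ++ [part], st.2.2 + joinCost + part.length)) (chunks, current, clen)).1
        = (rest.foldl (fun (st : List (List Char) × List Char) part =>
            if decide (max_len < ((st.2.length + 4 + part.length : Nat) : Int)) then
              (st.1 ++ [st.2], part)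
            else (st.1, st.2 ++ ' ' :: 'O' :: 'R' :: ' ' :: part))
            (chunks, PySem.Chars.join [' ', 'O', 'R', ' '] current)).1
      ∧ PySem.Chars.join [' ', 'O', 'R', ' ']
          ((rest.foldl (fun (st : List (List Char) × List (List Char) × Nat) part =>
            let joinCost : Nat := if st.2.1.isEmpty then 0 else 4
            if !st.2.1.isEmpty && decide (max_len < ((st.2.2 + joinCost + part.length : Nat) : Int)) then
              (st.1 ++ [PySem.Chars.join [' ', 'O', 'R', ' '] st.2.1], [part], part.length)
            else (st.1, st.2.1 ++ [part], st.2.2 + joinCost + part.length)) (chunks, current, clen)).2.1)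
        = (rest.foldl (fun (st : List (List Char) × List Char) part =>
            if decide (max_len < ((st.2.length + 4 + part.length : Nat) : Int)) then
              (st.1 ++ [st.2], part)
            else (st.1, st.2 ++ ' ' :: 'O' :: 'R' :: ' ' :: part))
            (chunks, PySem.Chars.join [' ', 'O', 'R', ' '] current)).2) := by
  intro rest
  induction rest with
  | nil =>
    intro chunks current clen hne hclen
    exact ⟨hne, rfl, rfl⟩
  | cons part rest ih =>
    intro chunks current clen hne hclen
    simp only [List.foldl_cons]
    have hcur : current.isEmpty = false := by
      cases current with
      | nil => exact absurd rfl hne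
      | cons a t => rfl
    by_cases hcond : max_len < ((clen + 4 + part.length : Nat) : Int)
    · have hcb : (!current.isEmpty && decide (max_len <
          ((clen + (if current.isEmpty then (0:Nat) else 4) + part.length : Nat) : Int))) = true := by
        simp only [hcur, Bool.not_false, Bool.true_and, Bool.false_eq_true, if_false,
          decide_eq_true_eq]
        push_cast at hcond ⊢
        omega
      have hcbB : decide (max_len <
          (((PySem.Chars.join [' ', 'O', 'R', ' '] current).length + 4 + part.length : Nat) : Int)) = true := by
        rw [← hclen]
        simp only [decide_eq_true_eq]
        push_cast at hcond ⊢
        omega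
      simp only [hcb, hcbB, if_true]
      have hrec := ih (chunks ++ [PySem.Chars.join [' ', 'O', 'R', ' '] current]) [part] part.length
        (by simp) (by simp [PySem.Chars.join_singleton])
      rw [PySem.Chars.join_singleton] at hrec
      exact hrec
    · have hcb : (!current.isEmpty && decide (max_len <
          ((clen + (if current.isEmpty then (0:Nat) else 4) + part.length : Nat) : Int))) = false := by
        simp only [hcur, Bool.not_false, Bool.true_and, Bool.false_eq_true, if_false,
          decide_eq_false_iff_not]
        push_cast at hcond ⊢
        omega
      have hcbB : decide (max_len <
          (((PySem.Chars.join [' ', 'O', 'R', ' '] current).length + 4 + part.length : Nat) : Int)) = false := by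
        rw [← hclen]
        simp only [decide_eq_false_iff_not]
        push_cast at hcond ⊢
        omega
      simp only [hcb, hcbB, Bool.false_eq_true, if_false]
      simp only [hcur, Bool.false_eq_true, if_false]
      have hjoin : PySem.Chars.join [' ', 'O', 'R', ' '] (current ++ [part])
          = PySem.Chars.join [' ', 'O', 'R', ' '] current ++ ' ' :: 'O' :: 'R' :: ' ' :: part := by
        rw [join_concat _ _ _ hne]
        simp
      have hlen2 : clen + 4 + part.length
          = (PySem.Chars.join [' ', 'O', 'R', ' '] (current ++ [part])).length := by
        rw [hjoin]
        simp only [List.length_append, List.length_cons, hclen]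
        omega
      have hrec := ih chunks (current ++ [part]) (clen + 4 + part.length) (by simp) hlen2
      rw [hjoin] at hrec
      exact hrec

theorem pack_final (max_len : Int) (rest : List (List Char)) (chunks current : List (List Char))
    (clen : Nat) (cur0 : List Char) (hne : current ≠ [])
    (hclen : clen = (PySem.Chars.join [' ', 'O', 'R', ' '] current).length)
    (hc0 : cur0 = PySem.Chars.join [' ', 'O', 'R', ' '] current) :
    (if (rest.foldl (fun (st : List (List Char) × List (List Char) × Nat) part =>
          let joinCost : Nat := if st.2.1.isEmpty then 0 else 4
          if !st.2.1.isEmpty && decide (max_len < ((st.2.2 + joinCost + part.length : Nat) : Int)) then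
            (st.1 ++ [PySem.Chars.join [' ', 'O', 'R', ' '] st.2.1], [part], part.length)
          else (st.1, st.2.1 ++ [part], st.2.2 + joinCost + part.length)) (chunks, current, clen)).2.1.isEmpty then
        (rest.foldl (fun (st : List (List Char) × List (List Char) × Nat) part =>
          let joinCost : Nat := if st.2.1.isEmpty then 0 else 4
          if !st.2.1.isEmpty && decide (max_len < ((st.2.2 + joinCost + part.length : Nat) : Int)) then
            (st.1 ++ [PySem.Chars.join [' ', 'O', 'R', ' '] st.2.1], [part], part.length)
          else (st.1, st.2.1 ++ [part], st.2.2 + joinCost + part.length)) (chunks, current, clen)).1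
      else
        (rest.foldl (fun (st : List (List Char) × List (List Char) × Nat) part =>
          let joinCost : Nat := if st.2.1.isEmpty then 0 else 4
          if !st.2.1.isEmpty && decide (max_len < ((st.2.2 + joinCost + part.length : Nat) : Int)) then
            (st.1 ++ [PySem.Chars.join [' ', 'O', 'R', ' '] st.2.1], [part], part.length)
          else (st.1, st.2.1 ++ [part], st.2.2 + joinCost + part.length)) (chunks, current, clen)).1
        ++ [PySem.Chars.join [' ', 'O', 'R', ' ']
            ((rest.foldl (fun (st : List (List Char) × List (List Char) × Nat) part =>
              let joinCost : Nat := if st.2.1.isEmpty then 0 else 4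
              if !st.2.1.isEmpty && decide (max_len < ((st.2.2 + joinCost + part.length : Nat) : Int)) then
                (st.1 ++ [PySem.Chars.join [' ', 'O', 'R', ' '] st.2.1], [part], part.length)
              else (st.1, st.2.1 ++ [part], st.2.2 + joinCost + part.length)) (chunks, current, clen)).2.1)])
      = (rest.foldl (fun (st : List (List Char) × List Char) part =>
            if decide (max_len < ((st.2.length + 4 + part.length : Nat) : Int)) then
              (st.1 ++ [st.2], part)
            else (st.1, st.2 ++ ' ' :: 'O' :: 'R' :: ' ' :: part)) (chunks, cur0)).1
        ++ [(rest.foldl (fun (st : List (List Char) × List Char) part =>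
            if decide (max_len < ((st.2.length + 4 + part.length : Nat) : Int)) then
              (st.1 ++ [st.2], part)
            else (st.1, st.2 ++ ' ' :: 'O' :: 'R' :: ' ' :: part)) (chunks, cur0)).2] := by
  subst hc0
  obtain ⟨hne', h1, h2⟩ := pack_eq max_len rest chunks current clen hne hclen
  rcases hA : (rest.foldl (fun (st : List (List Char) × List (List Char) × Nat) part =>
          let joinCost : Nat := if st.2.1.isEmpty then 0 else 4
          if !st.2.1.isEmpty && decide (max_len < ((st.2.2 + joinCost + part.length : Nat) : Int)) then
            (st.1 ++ [PySem.Chars.join [' ', 'O', 'R', ' '] st.2.1], [part], part.length)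
          else (st.1, st.2.1 ++ [part], st.2.2 + joinCost + part.length)) (chunks, current, clen))
    with ⟨ca, cb, cc⟩
  rw [hA] at hne' h1 h2
  dsimp only at hne' h1 h2 ⊢
  cases cb with
  | nil => exact absurd rfl hne'
  | cons x t =>
    simp only [List.isEmpty_cons, Bool.false_eq_true, if_false]
    rw [h1, h2]

-- ===== VERDICT (by name: the statement is the Claim_ definition above) =====
theorem chunk_cql_or_py_spec : Claim_equal_chunk_cql_or_py := by
  unfold Claim_equal_chunk_cql_or_py
  intro expr max_len _
  unfold Spec_chunk_cql_or_py
  simp only [chunk_cql_or_py, chunk_cql_or_py_alt]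
  rw [splitTopLevelOr_eq_bSplit]
  by_cases h1 : ((expr.toList.length : Int) ≤ max_len)
  · have hd : decide ((expr.toList.length : Int) ≤ max_len) = true := by simpa using h1
    rw [if_pos hd, if_pos hd]
  · have hd : ¬ (decide ((expr.toList.length : Int) ≤ max_len) = true) := by simpa using h1
    rw [if_neg hd, if_neg hd]
    by_cases h2 : (decide ((bSplit expr.toList).length < 2)
        || (bSplit expr.toList).any (fun p => decide (max_len < (p.length : Int)))) = true
    · rw [if_pos h2, if_pos h2]
    · rw [if_neg h2, if_neg h2]
      have hlen : 2 ≤ (bSplit expr.toList).length := by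
        simp only [Bool.or_eq_true, decide_eq_true_eq, not_or] at h2
        omega
      obtain ⟨p, rest, hpr⟩ : ∃ p rest, bSplit expr.toList = p :: rest := by
        cases hbs : bSplit expr.toList with
        | nil => rw [hbs] at hlen; simp at hlen
        | cons p rest => exact ⟨p, rest, rfl⟩
      rw [hpr]
      simp only [List.foldl_cons]
      have hstep0 : (if (!(([] : List (List Char))).isEmpty && decide (max_len <
            (((0 + if (([] : List (List Char))).isEmpty then (0:Nat) else 4) + p.length : Nat) : Int))) = true then
            (([] : List (List Char)) ++ [PySem.Chars.join [' ', 'O', 'R', ' '] ([] : List (List Char))], [p], p.length)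
          else (([] : List (List Char)), ([] : List (List Char)) ++ [p],
            (0 + if (([] : List (List Char))).isEmpty then (0:Nat) else 4) + p.length))
          = (([] : List (List Char)), [p], p.length) := by simp
      rw [hstep0]
      exact congrArg (List.map String.ofList)
        (pack_final max_len rest [] [p] p.length p (by simp)
          (by simp [PySem.Chars.join_singleton])
          (PySem.Chars.join_singleton [' ', 'O', 'R', ' '] p).symm)
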